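-- pv_equiv track=rewrite | github.com/junnl/leet_code_python | l216_combination_sum_iii.py | solution
-- ===== SOURCE A (Python) =====
-- def solution(k, n):
--
--     def helper(k, start, n, tmp):
--         if k == 0:
--             if n == 0 :
--                 res.append(tmp)
--             return
--
--         for i in range(start, 10):
--             if n - i < 0:
--                 break
--             helper(k - 1, i + 1, n - i, tmp + [i])
--
--     res = []
--     helper(k, 1, n, [])
--     return res
-- ===== SOURCE B (Python) =====
-- def solution(k, n):
--     # Enumerate all 512 digit subsets by bitmask, descending so output is in
--     # ascending lexicographic order, keeping those of size k summing to n.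
--     res = []
--     for mask in range(511, -1, -1):
--         digits = [d for d in range(1, 10) if (mask >> (9 - d)) & 1]
--         if len(digits) == k and sum(digits) == n:
--             res.append(digits)
--     return res
-- ===== Notes on version B (the rewrite author's own statement) =====
-- stated objective: alternative
-- what changed: Replaces the pruned recursive backtracking with accumulator by a flat iterative enumeration of all 512 digit-subset bitmasks (descending, which yields ascending lexicographic order), filtering by size k and sum n.
import Mathlib
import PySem

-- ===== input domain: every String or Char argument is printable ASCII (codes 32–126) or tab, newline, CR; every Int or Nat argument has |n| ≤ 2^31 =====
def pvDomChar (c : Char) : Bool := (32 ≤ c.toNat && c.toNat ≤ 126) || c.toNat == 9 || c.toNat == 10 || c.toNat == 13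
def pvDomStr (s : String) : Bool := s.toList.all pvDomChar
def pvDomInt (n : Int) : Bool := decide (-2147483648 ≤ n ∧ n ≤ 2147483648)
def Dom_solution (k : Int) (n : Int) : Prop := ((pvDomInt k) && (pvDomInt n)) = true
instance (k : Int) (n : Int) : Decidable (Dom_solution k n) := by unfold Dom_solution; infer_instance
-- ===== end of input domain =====

-- B replaces the pruned recursive backtracking by a flat iterative scan of all 512
-- digit-subset bitmasks (descending mask = ascending lexicographic order), filtered
-- by size k and sum n; same return value, alternative algorithm (not claimed faster).

-- ===== PORT A =====
-- helper(k, start, n, tmp): the for-loop with its break is the recursive loopA.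
mutual
def helperA (k : Int) (start : Int) (n : Int) (tmp : List Int) : List (List Int) :=
  if k = 0 then (if n = 0 then [tmp] else []) else loopA k n tmp start
termination_by 2 * (10 - start).toNat + 1
decreasing_by omega

def loopA (k : Int) (n : Int) (tmp : List Int) (i : Int) : List (List Int) :=
  if _h : i < 10 then
    if n - i < 0 then []
    else helperA (k - 1) (i + 1) (n - i) (tmp ++ [i]) ++ loopA k n tmp (i + 1)
  else []
termination_by 2 * (10 - i).toNat
decreasing_by
  · omega
  · omega
end

def solution (k : Int) (n : Int) : List (List Int) := helperA k 1 n []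

-- ===== PORT B =====
-- [d for d in range(1, 10) if (mask >> (9 - d)) & 1]  (9 - d ≥ 0 on this range, so
-- the .toNat on the shift amount is exact)
def digitsB (mask : Int) : List Int :=
  (PySem.List.pyRange 1 10 1).filter (fun d => decide (Int.land (mask >>> (9 - d).toNat) 1 ≠ 0))

def solution_alt (k : Int) (n : Int) : List (List Int) :=
  (PySem.List.pyRange 511 (-1) (-1)).foldl
    (fun res mask =>
      if ((digitsB mask).length : Int) = k ∧ (digitsB mask).sum = n
      then res ++ [digitsB mask] else res) []

-- ===== PRECONDITION & SPEC =====
def Spec_solution (k : Int) (n : Int) (out : List (List Int)) : Prop := out = solution_alt k n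
instance (k : Int) (n : Int) (out : List (List Int)) : Decidable (Spec_solution k n out) := by unfold Spec_solution; infer_instance

-- ===== CLAIM (what is proved, stated in full; the proofs are below) =====
def Claim_equal_solution : Prop := ∀ (k : Int) (n : Int), Dom_solution k n → Spec_solution k n (solution k n)

-- ===== LEMMAS AND PROOFS =====

-- all subsets of l, in the order 'descending bitmask with l[0] the highest bit'
def subsDesc : List Int → List (List Int)
  | [] => [[]]
  | d :: ds => (subsDesc ds).map (d :: ·) ++ subsDesc ds

def pPred (k n : Int) (c : List Int) : Bool := decide ((c.length : Int) = k ∧ c.sum = n)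

set_option maxRecDepth 100000 in
lemma maskmap :
    (PySem.List.pyRange 511 (-1) (-1)).map digitsB = subsDesc (PySem.List.pyRange 1 10 1) := by
  decide

lemma alt_eq (k n : Int) :
    solution_alt k n = (subsDesc (PySem.List.pyRange 1 10 1)).filter (pPred k n) := by
  unfold solution_alt
  rw [PySem.List.foldl_append_ite
        (fun mask => ((digitsB mask).length : Int) = k ∧ (digitsB mask).sum = n) digitsB]
  rw [show (fun mask => decide (((digitsB mask).length : Int) = k ∧ (digitsB mask).sum = n))
        = (pPred k n ∘ digitsB) from rfl]
  rw [← List.filter_map, maskmap]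
  simp

lemma mem_subsDesc_subset : ∀ (l : List Int) (c : List Int), c ∈ subsDesc l → ∀ x ∈ c, x ∈ l := by
  intro l
  induction l with
  | nil => intro c hc x hx; simp [subsDesc] at hc; subst hc; simp at hx
  | cons d ds ih =>
    intro c hc x hx
    simp [subsDesc] at hc
    rcases hc with ⟨c', hc', rfl⟩ | hc
    · rcases List.mem_cons.1 hx with rfl | hx
      · simp
      · simp [ih c' hc' x hx]
    · simp [ih c hc x hx]

lemma sum_nonneg_of_pos : ∀ (c : List Int), (∀ x ∈ c, 0 < x) → 0 ≤ c.sum := by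
  intro c
  induction c with
  | nil => simp
  | cons a as ih =>
    intro h
    simp only [List.sum_cons]
    have := h a (by simp)
    have := ih (fun x hx => h x (by simp [hx]))
    omega

lemma filter_len0 : ∀ (l : List Int) (n : Int),
    (subsDesc l).filter (pPred 0 n) = if n = 0 then [[]] else [] := by
  intro l
  induction l with
  | nil => intro n; simp only [subsDesc]; split <;> simp_all [pPred] <;> omega
  | cons d ds ih =>
    intro n
    simp only [subsDesc, List.filter_append, List.filter_map]
    have h1 : (subsDesc ds).filter ((pPred 0 n) ∘ (d :: ·)) = [] := by
      apply List.filter_eq_nil_iff.2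
      intro c _
      simp [pPred]
      omega
    rw [h1, ih]
    simp

lemma pPred_cons (k n i : Int) (c : List Int) : pPred k n (i :: c) = pPred (k - 1) (n - i) c := by
  simp only [pPred, List.length_cons, List.sum_cons, decide_eq_decide]
  constructor <;> (rintro ⟨h1, h2⟩; constructor <;> omega)

lemma loopA_eq : ∀ (f : Nat) (k n : Int) (tmp : List Int) (i : Int),
    1 ≤ i → (10 - i).toNat ≤ f → k ≠ 0 →
    loopA k n tmp i = ((subsDesc (PySem.List.pyRange i 10 1)).filter (pPred k n)).map (tmp ++ ·) := by
  intro f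
  induction f with
  | zero =>
    intro k n tmp i hi hf hk
    have h10 : ¬ i < 10 := by omega
    rw [loopA, dif_neg h10, PySem.List.pyRange_one_eq_nil (by omega)]
    simp [subsDesc, pPred]
    omega
  | succ f ih =>
    intro k n tmp i hi hf hk
    by_cases h10 : i < 10
    · rw [loopA, dif_pos h10, PySem.List.pyRange_one_cons h10]
      simp only [subsDesc, List.filter_append, List.filter_map, List.map_append, List.map_map]
      have hcons : (pPred k n) ∘ (i :: ·) = pPred (k - 1) (n - i) := by
        funext c; simp [Function.comp, pPred_cons]
      rw [hcons]
      have hmem : ∀ x ∈ PySem.List.pyRange (i + 1) 10 1, i + 1 ≤ x ∧ x < 10 := by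
        intro x hx; exact (PySem.List.mem_pyRange_one.1 hx)
      by_cases hneg : n - i < 0
      · rw [if_pos hneg]
        have e1 : (subsDesc (PySem.List.pyRange (i + 1) 10 1)).filter (pPred (k - 1) (n - i)) = [] := by
          apply List.filter_eq_nil_iff.2
          intro c hc hp
          simp [pPred] at hp
          have hs : 0 ≤ c.sum := by
            apply sum_nonneg_of_pos
            intro x hx
            have := (hmem x (mem_subsDesc_subset _ c hc x hx)).1
            omega
          omega
        have e2 : (subsDesc (PySem.List.pyRange (i + 1) 10 1)).filter (pPred k n) = [] := by
          apply List.filter_eq_nil_iff.2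
          intro c hc hp
          simp [pPred] at hp
          obtain ⟨hl, hs⟩ := hp
          cases c with
          | nil => simp at hl; omega
          | cons x cs =>
            have hx := (hmem x (mem_subsDesc_subset _ _ hc x (by simp))).1
            have hcs : 0 ≤ cs.sum := by
              apply sum_nonneg_of_pos
              intro y hy
              have := (hmem y (mem_subsDesc_subset _ _ hc y (by simp [hy]))).1
              omega
            simp [List.sum_cons] at hs
            omega
        rw [e1, e2]
        simp
      · rw [if_neg hneg]
        have hloop : loopA k n tmp (i + 1)
            = ((subsDesc (PySem.List.pyRange (i + 1) 10 1)).filter (pPred k n)).map (tmp ++ ·) :=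
          ih k n tmp (i + 1) (by omega) (by omega) hk
        have hmapeq : ∀ L : List (List Int),
            L.map ((tmp ++ ·) ∘ (i :: ·)) = L.map ((tmp ++ [i]) ++ ·) := by
          intro L; apply List.map_congr_left; intro c _; simp
        by_cases hk1 : k - 1 = 0
        · rw [helperA, if_pos hk1, hloop, hk1, filter_len0]
          by_cases hn : n - i = 0 <;> simp [hn]
        · rw [helperA, if_neg hk1, hloop,
              ih (k - 1) (n - i) (tmp ++ [i]) (i + 1) (by omega) (by omega) hk1,
              hmapeq]
    · rw [loopA, dif_neg h10, PySem.List.pyRange_one_eq_nil (by omega)]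
      simp [subsDesc, pPred]
      omega

lemma solution_eq (k n : Int) :
    solution k n = (subsDesc (PySem.List.pyRange 1 10 1)).filter (pPred k n) := by
  unfold solution
  rw [helperA]
  by_cases hk : k = 0
  · rw [if_pos hk, hk, filter_len0]
  · rw [if_neg hk, loopA_eq 9 k n [] 1 (by omega) (by omega) hk]
    simp

-- ===== VERDICT (by name: the statement is the Claim_ definition above) =====
theorem solution_spec : Claim_equal_solution := by
  intro k n _
  unfold Spec_solution
  rw [solution_eq, alt_eq]
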